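-- pv_equiv track=rewrite | github.com/kyungwon-dev/Algorithm_Solved | 프로그래머스/2/142085. 디펜스 게임/디펜스 게임.py | solution
-- ===== SOURCE A (Python) =====
-- import heapq
--
-- def solution(n, k, enemy):
--     answer = 0
--     stage = []
--     # 우선순위 큐 사용.
--     # enemy의 최대 길이는 1000000
--     # 따라서 시간복잡도 고려. n^2로는 해결 불가능. nlogn 으로 해결 가능
--
--     if k >= len(enemy):
--         return len(enemy)
--
--     for i in range(0, len(enemy)):
--         heapq.heappush(stage, enemy[i])
--         if len(stage) > k: # 통과한 길이가 무적권 개수보다 더 클 때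
--             minimum = heapq.heappop(stage) # 가장 약한 적은 무적권을 사용 안함
--             n -= minimum # 사용하지 않으므로 제거
--             if n < 0: # 가장 약한 적을 무적권 사용하지 않고도 제거 불가능하다면, 최대 stage에 도달했다고 볼 수 있다.
--                 return answer
--
--         answer+=1
--     return answer
-- ===== SOURCE B (Python) =====
-- def solution(n, k, enemy):
--     # Stage m is reachable iff the damage actually taken over the first m
--     # stages -- the sum of the m-k weakest of enemy[:m] (the k strongest are
--     # covered by invincibility) -- stays within n.  Scan m upward and return
--     # just before the first stage where that damage exceeds n.
--     for m in range(max(k, 0) + 1, len(enemy) + 1):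
--         if sum(sorted(enemy[:m])[: m - k]) > n:
--             return m - 1
--     return len(enemy)
-- ===== Notes on version B (the rewrite author's own statement) =====
-- stated objective: alternative
-- what changed: Replaces the incremental min-heap simulation with a direct per-prefix characterisation: for each candidate stage count m it recomputes the damage taken as the sum of the m-k smallest of the sorted prefix enemy[:m] and returns just before the first m where it exceeds n; no heap or running state is kept.
import Mathlib
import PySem

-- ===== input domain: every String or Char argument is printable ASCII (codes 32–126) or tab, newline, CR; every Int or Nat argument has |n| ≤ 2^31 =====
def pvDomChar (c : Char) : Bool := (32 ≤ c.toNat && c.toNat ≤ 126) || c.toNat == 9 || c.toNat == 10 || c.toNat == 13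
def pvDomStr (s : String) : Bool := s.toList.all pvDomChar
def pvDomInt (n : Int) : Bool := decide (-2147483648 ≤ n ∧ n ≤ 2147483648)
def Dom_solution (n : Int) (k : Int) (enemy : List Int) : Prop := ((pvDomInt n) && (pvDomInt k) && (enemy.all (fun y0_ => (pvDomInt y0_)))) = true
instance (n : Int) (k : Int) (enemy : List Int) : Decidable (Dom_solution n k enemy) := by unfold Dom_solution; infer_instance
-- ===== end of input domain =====

-- B replaces A's incremental min-heap with a per-prefix recomputation: damage after m
-- stages = sum of the m-k smallest of enemy[:m]; return just before it first exceeds n.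

-- ===== PORT A =====
-- heapq modelled as a sorted list: heappush = ordered insert, heappop = take the head
-- (the sequence of popped values — the only thing A observes — is identical).
def pvInsort (e : Int) : List Int → List Int
  | [] => [e]
  | x :: xs => if e ≤ x then e :: x :: xs else x :: pvInsort e xs

def pvLoopA (k : Int) : List Int → Int → Int → List Int → Int
  | [], _, answer, _ => answer
  | e :: rest, n, answer, stage =>
      let stage' := pvInsort e stage
      if ((stage'.length : Int)) > k then
        let minimum := stage'.headD 0
        let n' := n - minimum
        if n' < 0 then answer
        else pvLoopA k rest n' (answer + 1) stage'.tail
      else pvLoopA k rest n (answer + 1) stage'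

def solution (n : Int) (k : Int) (enemy : List Int) : Int :=
  if k ≥ (enemy.length : Int) then (enemy.length : Int)
  else pvLoopA k enemy n 0 []

-- ===== PORT B =====
def pvLoopB (n : Int) (k : Int) (enemy : List Int) : List Int → Int
  | [] => (enemy.length : Int)
  | m :: rest =>
      if (PySem.List.slice (PySem.List.sorted (PySem.List.slice enemy none (some m)) id false) none (some (m - k))).sum > n
      then m - 1
      else pvLoopB n k enemy rest

def solution_alt (n : Int) (k : Int) (enemy : List Int) : Int :=
  pvLoopB n k enemy (PySem.List.pyRange (max k 0 + 1) ((enemy.length : Int) + 1) 1)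

-- ===== PRECONDITION & SPEC =====
def Spec_solution (n : Int) (k : Int) (enemy : List Int) (out : Int) : Prop := out = solution_alt n k enemy
instance (n : Int) (k : Int) (enemy : List Int) (out : Int) : Decidable (Spec_solution n k enemy out) := by unfold Spec_solution; infer_instance

-- ===== CLAIM (what is proved, stated in full; the proofs are below) =====
def Claim_equal_solution : Prop := ∀ (n : Int) (k : Int) (enemy : List Int), Dom_solution n k enemy → Spec_solution n k enemy (solution n k enemy)

-- ===== LEMMAS AND PROOFS =====

theorem pvInsort_perm (e : Int) (l : List Int) : (pvInsort e l).Perm (e :: l) := by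
  induction l with
  | nil => simp [pvInsort]
  | cons x xs ih =>
      simp only [pvInsort]
      split
      · exact List.Perm.refl _
      · exact (List.Perm.cons x ih).trans (List.Perm.swap e x xs)

theorem pvInsort_pairwise (e : Int) (l : List Int) (h : l.Pairwise (· ≤ ·)) :
    (pvInsort e l).Pairwise (· ≤ ·) := by
  induction l with
  | nil => simp [pvInsort]
  | cons x xs ih =>
      rcases List.pairwise_cons.mp h with ⟨hx, hxs⟩
      simp only [pvInsort]
      split
      · rename_i he
        exact List.pairwise_cons.mpr ⟨by
          intro y hy
          rcases List.mem_cons.mp hy with rfl | hy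
          · exact he
          · exact le_trans he (hx y hy), h⟩
      · rename_i he
        refine List.pairwise_cons.mpr ⟨?_, ih hxs⟩
        intro y hy
        have := (pvInsort_perm e xs).mem_iff.mp hy
        rcases List.mem_cons.mp this with rfl | hy'
        · omega
        · exact hx y hy'

theorem sorted_append_insort (p : List Int) (e : Int) :
    PySem.List.sorted (p ++ [e]) id false = pvInsort e (PySem.List.sorted p id false) := by
  have hperm : (pvInsort e (PySem.List.sorted p id false)).Perm (p ++ [e]) := by
    refine (pvInsort_perm e _).trans ?_
    refine (List.Perm.cons e (PySem.List.sorted_perm p id false)).trans ?_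
    simpa using (List.perm_append_comm (l₁ := [e]) (l₂ := p))
  have h1 : (PySem.List.sorted (p ++ [e]) id false).Pairwise (· ≤ ·) := by
    simpa using PySem.List.sorted_pairwise (xs := p ++ [e]) (key := (id : Int → Int))
  have h2 : (pvInsort e (PySem.List.sorted p id false)).Pairwise (· ≤ ·) := by
    refine pvInsort_pairwise _ _ ?_
    simpa using PySem.List.sorted_pairwise (xs := p) (key := (id : Int → Int))
  exact List.Perm.eq_of_pairwise (fun a b _ _ hab hba => le_antisymm hab hba) h1 h2
    ((PySem.List.sorted_perm (p ++ [e]) id false).trans hperm.symm)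

theorem pvInsort_length (e : Int) (l : List Int) : (pvInsort e l).length = l.length + 1 := by
  induction l with
  | nil => rfl
  | cons x xs ih => simp only [pvInsort]; split <;> simp [ih]

-- the crux: inserting into the suffix of a sorted list, in terms of the full insertion
theorem pvInsort_drop (e : Int) :
    ∀ (s : List Int) (d : Nat), s.Pairwise (· ≤ ·) →
      pvInsort e (s.drop d)
        = (((pvInsort e s).take (d + 1)).sum - (s.take d).sum) :: (pvInsort e s).drop (d + 1) := by
  intro s
  induction s with
  | nil => intro d _; cases d <;> simp [pvInsort]
  | cons x xs ih =>
      intro d h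
      rcases List.pairwise_cons.mp h with ⟨hx, hxs⟩
      cases d with
      | zero =>
          simp only [List.drop_zero, List.take_zero, List.sum_nil]
          cases hins : pvInsort e (x :: xs) with
          | nil => exact absurd (congrArg List.length hins) (by simp [pvInsort_length])
          | cons a as => simp
      | succ d' =>
          simp only [List.drop_succ_cons, List.take_succ_cons, List.sum_cons]
          by_cases he : e ≤ x
          · have hall : ∀ y ∈ xs.drop d', e ≤ y := by
              intro y hy
              exact le_trans he (hx y (List.drop_subset _ _ hy))
            have hfront : pvInsort e (xs.drop d') = e :: xs.drop d' := by
              cases hd : xs.drop d' with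
              | nil => simp [pvInsort]
              | cons a as =>
                  have : e ≤ a := hall a (by rw [hd]; exact List.mem_cons_self ..)
                  simp [pvInsort, this]
            rw [hfront]
            simp only [pvInsort, if_pos he, List.take_succ_cons, List.sum_cons,
              List.drop_succ_cons]
            congr 1
            ring
          · simp only [pvInsort, if_neg he, List.take_succ_cons, List.sum_cons,
              List.drop_succ_cons]
            rw [ih d' hxs]
            congr 1
            ring

-- damage after m stages and the remaining heap, in closed form
def pvDam (k : Int) (p : List Int) : Int :=
  ((PySem.List.sorted p id false).take (p.length - k.toNat)).sum

def pvStg (k : Int) (p : List Int) : List Int :=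
  (PySem.List.sorted p id false).drop (p.length - k.toNat)

theorem take_toNat_eq (s : List Int) (m : Nat) (k : Int) (hlen : s.length = m) :
    s.take ((m : Int) - k).toNat = s.take (m - k.toNat) := by
  exact List.take_eq_take_iff.mpr (by omega)

theorem sum_slice_eq_dam (k : Int) (q : List Int) (hk : k ≤ (q.length : Int)) :
    (PySem.List.slice (PySem.List.sorted q id false) none (some ((q.length : Int) - k))).sum
      = pvDam k q := by
  rw [PySem.List.slice_to _ (by omega)]
  rw [take_toNat_eq _ q.length k (by simp [PySem.List.length_sorted])]
  rfl

theorem take_prefix (p : List Int) (e : Int) (r : List Int) :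
    PySem.List.slice (p ++ e :: r) none (some ((p.length : Int) + 1)) = p ++ [e] := by
  rw [PySem.List.slice_to _ (by omega)]
  have : ((p.length : Int) + 1).toNat = p.length + 1 := by omega
  rw [this, List.take_append]
  simp

theorem main_loop (n0 k : Int) :
    ∀ (rest p : List Int),
      pvLoopA k rest (n0 - pvDam k p) (p.length : Int) (pvStg k p)
        = pvLoopB n0 k (p ++ rest)
            (PySem.List.pyRange (max ((p.length : Int) + 1) (k + 1)) (((p ++ rest).length : Int) + 1) 1) := by
  intro rest
  induction rest with
  | nil =>
      intro p
      rw [PySem.List.pyRange_one_eq_nil (by simp only [List.append_nil]; omega)]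
      simp [pvLoopA, pvLoopB]
  | cons e rest' ih =>
      intro p
      have hsorted : (PySem.List.sorted p id false).Pairwise (· ≤ ·) := by
        simpa using PySem.List.sorted_pairwise (xs := p) (key := (id : Int → Int))
      have hlen : (PySem.List.sorted p id false).length = p.length := PySem.List.length_sorted ..
      have hins : pvInsort e (PySem.List.sorted p id false) = PySem.List.sorted (p ++ [e]) id false :=
        (sorted_append_insort p e).symm
      have hlen' : (PySem.List.sorted (p ++ [e]) id false).length = p.length + 1 := by
        rw [PySem.List.length_sorted]; simp
      have hcrux := pvInsort_drop e (PySem.List.sorted p id false) (p.length - k.toNat) hsorted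
      rw [hins] at hcrux
      -- one step of A's loop
      simp only [pvLoopA, pvStg, hcrux]
      simp only [List.length_cons, List.headD_cons, List.tail_cons]
      by_cases hk : k ≤ (p.length : Int)
      · -- the heap is over capacity: pop fires
        have hkN : k.toNat ≤ p.length := by omega
        have hd1 : p.length - k.toNat + 1 = p.length + 1 - k.toNat := by omega
        have hcond : ((((PySem.List.sorted (p ++ [e]) id false).drop (p.length - k.toNat + 1)).length + 1 : Nat) : Int) > k := by
          simp only [List.length_drop, hlen']
          omega
        rw [if_pos hcond]
        have hdam : ((PySem.List.sorted (p ++ [e]) id false).take (p.length - k.toNat + 1)).sum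
              - ((PySem.List.sorted p id false).take (p.length - k.toNat)).sum
            = pvDam k (p ++ [e]) - pvDam k p := by
          simp only [pvDam, List.length_append, List.length_cons, List.length_nil, hd1]
        have hmax : max ((p.length : Int) + 1) (k + 1) = (p.length : Int) + 1 := by omega
        rw [hmax, PySem.List.pyRange_one_cons (by simp)]
        simp only [pvLoopB]
        rw [take_prefix p e rest']
        have hq : ((p ++ [e]).length : Int) = (p.length : Int) + 1 := by simp
        have hslice := sum_slice_eq_dam k (p ++ [e]) (by omega)
        rw [hq] at hslice
        rw [hslice, hdam]
        by_cases hfail : pvDam k (p ++ [e]) > n0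
        · rw [if_pos (by omega : n0 - pvDam k p - (pvDam k (p ++ [e]) - pvDam k p) < 0),
              if_pos hfail]
          ring
        · rw [if_neg (by omega : ¬ (n0 - pvDam k p - (pvDam k (p ++ [e]) - pvDam k p) < 0)),
              if_neg hfail]
          have := ih (p ++ [e])
          rw [List.append_assoc] at this
          simp only [List.singleton_append] at this
          rw [show max (((p ++ [e]).length : Int) + 1) (k + 1) = ((p ++ [e]).length : Int) + 1 by
                simp; omega] at this
          rw [show (n0 - pvDam k p - (pvDam k (p ++ [e]) - pvDam k p)) = n0 - pvDam k (p ++ [e]) by ring]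
          rw [show ((p.length : Int) + 1) = (((p ++ [e]).length : Nat) : Int) by simp]
          rw [show (PySem.List.sorted (p ++ [e]) id false).drop (p.length - k.toNat + 1)
                = pvStg k (p ++ [e]) by simp only [pvStg, List.length_append, List.length_cons,
                  List.length_nil, hd1]]
          rw [this]
      · -- ramp-up phase: no pop, damage stays 0
        have hkN : p.length + 1 ≤ k.toNat := by omega
        have hcond : ¬ (((((PySem.List.sorted (p ++ [e]) id false).drop (p.length - k.toNat + 1)).length + 1 : Nat) : Int) > k) := by
          simp only [List.length_drop, hlen']
          omega
        rw [if_neg hcond]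
        have hdam0 : pvDam k p = pvDam k (p ++ [e]) := by
          simp only [pvDam, List.length_append, List.length_cons, List.length_nil]
          rw [show p.length - k.toNat = 0 by omega, show p.length + 1 - k.toNat = 0 by omega]
          simp
        have hstep : (((PySem.List.sorted (p ++ [e]) id false).take (p.length - k.toNat + 1)).sum
                - ((PySem.List.sorted p id false).take (p.length - k.toNat)).sum)
              :: (PySem.List.sorted (p ++ [e]) id false).drop (p.length - k.toNat + 1)
            = pvStg k (p ++ [e]) := by
          rw [← hcrux, show p.length - k.toNat = 0 by omega]
          simp only [List.drop_zero, hins, pvStg, List.length_append, List.length_cons,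
            List.length_nil]
          rw [show p.length + 1 - k.toNat = 0 by omega, List.drop_zero]
        rw [hstep, hdam0]
        have := ih (p ++ [e])
        rw [List.append_assoc] at this
        simp only [List.singleton_append] at this
        rw [show max (((p ++ [e]).length : Int) + 1) (k + 1) = k + 1 by simp; omega] at this
        rw [show max ((p.length : Int) + 1) (k + 1) = k + 1 by omega]
        rw [show ((p.length : Int) + 1) = (((p ++ [e]).length : Nat) : Int) by simp]
        rw [this]

theorem sorted_nil : PySem.List.sorted ([] : List Int) id false = [] := by
  have := PySem.List.length_sorted ([] : List Int) (id : Int → Int) false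
  exact List.eq_nil_of_length_eq_zero (by simpa using this)

-- ===== VERDICT (by name: the statement is the Claim_ definition above) =====
theorem solution_spec : Claim_equal_solution := by
  intro n k enemy _
  unfold Spec_solution solution solution_alt
  split
  · rename_i hge
    rw [PySem.List.pyRange_one_eq_nil (by omega)]
    simp [pvLoopB]
  · rename_i hlt
    have h := main_loop n k enemy []
    simp only [pvDam, pvStg, sorted_nil, List.take_nil, List.drop_nil, List.sum_nil,
      sub_zero, List.length_nil, Nat.cast_zero, List.nil_append, zero_add] at h
    rw [show max k 0 + 1 = max (1 : Int) (k + 1) by omega]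
    exact h
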